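-- pv_equiv track=rewrite | github.com/nickruof/SiPMStudio | SiPMStudio/io/reprocess_files_mpi.py | _chunk_indices
-- ===== SOURCE A (Python) =====
-- def _chunk_indices(rank, size, chunk, num_rows):
--     total_indices = num_rows // chunk + 1
--     idx_per_rank = total_indices // size
--     chunk_dict = {}
--     for idx in range(0, size):
--         chunk_dict[idx] = [idx * idx_per_rank, idx * idx_per_rank + idx_per_rank - 1]
--         if idx == (size - 1):
--             chunk_dict[idx][1] += 1
--
--     while chunk_dict[size-1][1] < total_indices:
--         for idx in range(0, size):
--             if idx == 0:
--                 chunk_dict[idx][1] += 1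
--             else:
--                 chunk_dict[idx][0] += 1
--                 chunk_dict[idx][1] += 1
--
--     return chunk_dict[rank][0], chunk_dict[rank][1]
-- ===== SOURCE B (Python) =====
-- def _chunk_indices(rank, size, chunk, num_rows):
--     if not 0 <= rank < size:
--         raise ValueError("rank %r out of range for communicator size %r" % (rank, size))
--     total = num_rows // chunk + 1
--     q = total // size
--     r = total - size * q
--     if rank == size - 1:
--         return (size - 1) * q + r, size * q + r
--     if rank == 0:
--         return 0, q - 1 + r
--     return rank * q + r, rank * q + q - 1 + r
-- ===== Notes on version B (the rewrite author's own statement) =====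
-- stated objective: faster
-- what changed: replaces the dict-building loop plus the O(remainder * size) shifting while-loop with a closed-form computation of the rank's [low, high] from quotient and remainder
import Mathlib
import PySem

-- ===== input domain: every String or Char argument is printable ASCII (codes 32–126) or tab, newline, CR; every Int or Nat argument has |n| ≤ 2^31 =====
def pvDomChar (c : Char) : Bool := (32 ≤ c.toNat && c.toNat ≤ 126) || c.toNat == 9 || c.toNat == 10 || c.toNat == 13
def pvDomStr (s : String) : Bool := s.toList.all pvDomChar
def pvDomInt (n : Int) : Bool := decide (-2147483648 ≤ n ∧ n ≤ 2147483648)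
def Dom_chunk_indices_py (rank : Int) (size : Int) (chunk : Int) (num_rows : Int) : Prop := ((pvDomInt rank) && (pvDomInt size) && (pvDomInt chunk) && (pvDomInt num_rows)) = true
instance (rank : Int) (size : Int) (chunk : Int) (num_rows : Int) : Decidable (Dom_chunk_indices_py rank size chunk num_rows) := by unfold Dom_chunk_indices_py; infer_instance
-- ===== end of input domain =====

-- B replaces A's dict-building loop and remainder-shifting while-loop by a closed-form
-- computation of the rank's [low, high]; equivalence of the return values is proved on Pre_.

-- ===== PORT A =====
-- chunk_dict[idx][1] += 1  /  chunk_dict[idx][0] += 1  (the entry lists always have length 2)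
def pvBumpHi (l : List Int) : List Int := l.set 1 (l.getD 1 0 + 1)
def pvBumpLo (l : List Int) : List Int := l.set 0 (l.getD 0 0 + 1)

-- for idx in range(0, size): chunk_dict[idx] = [...]; if idx == size-1: chunk_dict[idx][1] += 1
def pvInitA (size q : Int) : PySem.Dict Int (List Int) :=
  (PySem.List.pyRange 0 size 1).foldl
    (fun d idx =>
      let d1 := d.insert idx [idx * q, idx * q + q - 1]
      if idx == size - 1 then d1.modify idx [] pvBumpHi else d1)
    PySem.Dict.empty

-- body of the while loop: one pass over range(0, size)
def pvPassA (size : Int) (d : PySem.Dict Int (List Int)) : PySem.Dict Int (List Int) :=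
  (PySem.List.pyRange 0 size 1).foldl
    (fun d idx =>
      if idx == 0 then d.modify idx [] pvBumpHi
      else (d.modify idx [] pvBumpLo).modify idx [] pvBumpHi) d

-- while chunk_dict[size-1][1] < total_indices: …   (fuel makes the loop total; on Pre_ it never runs out)
def pvLoopA (size total : Int) : Nat → PySem.Dict Int (List Int) → PySem.Dict Int (List Int)
  | 0, d => d
  | Nat.succ n, d =>
    if (d.getD (size - 1) []).getD 1 0 < total then pvLoopA size total n (pvPassA size d) else d

def chunk_indices_py (rank : Int) (size : Int) (chunk : Int) (num_rows : Int) : List Int :=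
  let total := PySem.Int.floordiv num_rows chunk + 1
  let idx_per_rank := PySem.Int.floordiv total size
  let d := pvLoopA size total (size.toNat + 1) (pvInitA size idx_per_rank)
  let l := d.getD rank []
  [l.getD 0 0, l.getD 1 0]

-- ===== PORT B =====
def chunk_indices_py_alt (rank : Int) (size : Int) (chunk : Int) (num_rows : Int) : List Int :=
  -- Source B raises ValueError when rank is not in range(size); that case is outside Pre_ ([] is a dummy)
  if ¬ (0 ≤ rank ∧ rank < size) then []
  else
    let total := PySem.Int.floordiv num_rows chunk + 1
    let q := PySem.Int.floordiv total size
    let r := total - size * q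
    if rank = size - 1 then [(size - 1) * q + r, size * q + r]
    else if rank = 0 then [0, q - 1 + r]
    else [rank * q + r, rank * q + q - 1 + r]

-- ===== PRECONDITION & SPEC =====
-- Pre_ excludes exactly the inputs on which A raises: chunk = 0 or size ≤ 0 (ZeroDivisionError /
-- KeyError) and rank outside range(size) (KeyError).
def Pre_chunk_indices_py (rank : Int) (size : Int) (chunk : Int) (num_rows : Int) : Prop :=
  chunk ≠ 0 ∧ 0 < size ∧ 0 ≤ rank ∧ rank < size
instance (rank : Int) (size : Int) (chunk : Int) (num_rows : Int) : Decidable (Pre_chunk_indices_py rank size chunk num_rows) := by unfold Pre_chunk_indices_py; infer_instance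

def pvWitness_chunk_indices_py : Int × Int × Int × Int := (1, 3, 2, 10)

def Spec_chunk_indices_py (rank : Int) (size : Int) (chunk : Int) (num_rows : Int) (out : List Int) : Prop := out = chunk_indices_py_alt rank size chunk num_rows
instance (rank : Int) (size : Int) (chunk : Int) (num_rows : Int) (out : List Int) : Decidable (Spec_chunk_indices_py rank size chunk num_rows out) := by unfold Spec_chunk_indices_py; infer_instance

-- ===== CLAIM (what is proved, stated in full; the proofs are below) =====
def Claim_equal_chunk_indices_py : Prop := ∀ (rank : Int) (size : Int) (chunk : Int) (num_rows : Int), Dom_chunk_indices_py rank size chunk num_rows → Pre_chunk_indices_py rank size chunk num_rows → Spec_chunk_indices_py rank size chunk num_rows (chunk_indices_py rank size chunk num_rows)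

-- ===== LEMMAS AND PROOFS =====

def pvEntry (size q t i : Int) : List Int :=
  [i * q + (if i = 0 then 0 else t), i * q + q - 1 + (if i = size - 1 then 1 else 0) + t]

def pvDspec (size q t : Int) (d : PySem.Dict Int (List Int)) : Prop :=
  ∀ i : Int, d.getD i [] = if 0 ≤ i ∧ i < size then pvEntry size q t i else []

lemma pvInit_aux (size q : Int) (n : Nat) (hn : (n : Int) ≤ size) :
    ∀ i : Int, (((List.range n).map (fun k : Nat => ((0:Int) + (k:Int)))).foldl
      (fun d idx =>
        let d1 := d.insert idx [idx * q, idx * q + q - 1]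
        if idx == size - 1 then d1.modify idx [] pvBumpHi else d1)
      PySem.Dict.empty).getD i [] = if 0 ≤ i ∧ i < (n : Int) then pvEntry size q 0 i else [] := by
  induction n with
  | zero =>
    intro i
    rw [if_neg (by omega)]
    simp [PySem.Dict.getD_empty]
  | succ n ih =>
    intro i
    have hn' : (n : Int) ≤ size := by omega
    rw [List.range_succ, List.map_append, List.foldl_append]
    simp only [List.map_cons, List.map_nil, List.foldl_cons, List.foldl_nil]
    by_cases hlast : ((0:Int) + (n:Int)) = size - 1
    · simp only [show ((((0:Int) + (n:Int)) == size - 1)) = true from beq_iff_eq.mpr hlast, if_true]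
      rw [PySem.Dict.getD_modify]
      by_cases hi : i = (0:Int) + (n:Int)
      · subst hi
        rw [if_pos rfl, PySem.Dict.getD_insert_self, if_pos (by omega)]
        simp only [pvBumpHi, pvEntry, List.set, List.getD, List.getElem?_cons_succ,
          List.getElem?_cons_zero, Option.getD_some, List.cons.injEq, and_true]
        refine ⟨by split <;> ring, by rw [if_pos hlast]; ring⟩
      · rw [if_neg hi, PySem.Dict.getD_insert, if_neg hi, ih hn' i]
        split_ifs <;> first | rfl | (exfalso; push_cast at *; omega)
    · simp only [show ((((0:Int) + (n:Int)) == size - 1)) = false from beq_eq_false_iff_ne.mpr hlast, Bool.false_eq_true, if_false]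
      rw [PySem.Dict.getD_insert]
      by_cases hi : i = (0:Int) + (n:Int)
      · subst hi
        rw [if_pos rfl, if_pos (by omega)]
        simp only [pvEntry, List.cons.injEq, and_true]
        refine ⟨by split <;> ring, by rw [if_neg hlast]; ring⟩
      · rw [if_neg hi, ih hn' i]
        split_ifs <;> first | rfl | (exfalso; push_cast at *; omega)

lemma pvPass_aux (size q t : Int) (d : PySem.Dict Int (List Int)) (hd : pvDspec size q t d)
    (n : Nat) (hn : (n : Int) ≤ size) :
    ∀ i : Int, (((List.range n).map (fun k : Nat => ((0:Int) + (k:Int)))).foldl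
      (fun d idx =>
        if idx == 0 then d.modify idx [] pvBumpHi
        else (d.modify idx [] pvBumpLo).modify idx [] pvBumpHi) d).getD i []
      = if 0 ≤ i ∧ i < (n : Int) then pvEntry size q (t + 1) i else d.getD i [] := by
  induction n with
  | zero =>
    intro i
    rw [if_neg (by omega)]
    simp
  | succ n ih =>
    intro i
    have hn' : (n : Int) ≤ size := by omega
    have hself : d.getD ((0:Int) + (n:Int)) [] = pvEntry size q t ((0:Int) + (n:Int)) := by
      rw [hd]; rw [if_pos (by omega)]
    rw [List.range_succ, List.map_append, List.foldl_append]
    simp only [List.map_cons, List.map_nil, List.foldl_cons, List.foldl_nil]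
    by_cases h0 : ((0:Int) + (n:Int)) = 0
    · simp only [show ((((0:Int) + (n:Int)) == 0)) = true from beq_iff_eq.mpr h0, if_true]
      rw [PySem.Dict.getD_modify]
      by_cases hi : i = (0:Int) + (n:Int)
      · subst hi
        rw [if_pos rfl, ih hn', if_neg (by omega), hself,
          if_pos (by omega)]
        simp only [pvBumpHi, pvEntry, List.set, List.getD, List.getElem?_cons_succ,
          List.getElem?_cons_zero, Option.getD_some, List.cons.injEq, and_true]
        refine ⟨by simp [h0], by split <;> ring⟩
      · rw [if_neg hi, ih hn' i]
        split_ifs <;> first | rfl | (exfalso; push_cast at *; omega)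
    · simp only [show ((((0:Int) + (n:Int)) == 0)) = false from beq_eq_false_iff_ne.mpr h0,
        Bool.false_eq_true, if_false]
      rw [PySem.Dict.getD_modify]
      by_cases hi : i = (0:Int) + (n:Int)
      · subst hi
        rw [if_pos rfl, PySem.Dict.getD_modify_self, ih hn',
          if_neg (by omega), hself, if_pos (by omega)]
        simp only [pvBumpHi, pvBumpLo, pvEntry, List.set, List.getD, List.getElem?_cons_succ,
          List.getElem?_cons_zero, Option.getD_some, List.cons.injEq, and_true]
        refine ⟨by rw [if_neg h0, if_neg h0]; ring, by split <;> ring⟩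
      · rw [if_neg hi, PySem.Dict.getD_modify, if_neg hi, ih hn' i]
        split_ifs <;> first | rfl | (exfalso; push_cast at *; omega)

lemma pvInitA_spec (size q : Int) (hs : 0 < size) : pvDspec size q 0 (pvInitA size q) := by
  intro i
  unfold pvInitA
  rw [PySem.List.pyRange_one]
  have hcast : ((size.toNat : Int)) = size := Int.toNat_of_nonneg (le_of_lt hs)
  have := pvInit_aux size q (size - 0).toNat (by simp [hcast])
  rw [this i]
  simp only [sub_zero, hcast]

lemma pvPassA_spec (size q t : Int) (hs : 0 < size) (d : PySem.Dict Int (List Int))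
    (hd : pvDspec size q t d) : pvDspec size q (t + 1) (pvPassA size d) := by
  intro i
  unfold pvPassA
  rw [PySem.List.pyRange_one]
  have hcast : ((size.toNat : Int)) = size := Int.toNat_of_nonneg (le_of_lt hs)
  have := pvPass_aux size q t d hd (size - 0).toNat (by simp [hcast])
  rw [this i]
  simp only [sub_zero, hcast]
  split_ifs with h1
  · rfl
  · rw [hd i, if_neg h1]

lemma pvLoopA_spec (size q total r : Int) (hs : 0 < size) (htot : total = size * q + r) :
    ∀ (f : Nat) (t : Int) (d : PySem.Dict Int (List Int)), pvDspec size q t d →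
      t ≤ r → (r - t).toNat < f → pvDspec size q r (pvLoopA size total f d) := by
  intro f
  induction f with
  | zero => intro t d _ _ hf; omega
  | succ f ih =>
    intro t d hd htr hf
    unfold pvLoopA
    have hcond : (d.getD (size - 1) []).getD 1 0 = size * q + t := by
      rw [hd (size - 1), if_pos (by omega)]
      simp only [pvEntry, List.getD, List.getElem?_cons_succ, List.getElem?_cons_zero,
        Option.getD_some, if_true]
      ring
    rw [hcond]
    by_cases hlt : size * q + t < total
    · rw [if_pos hlt]
      have htlt : t < r := by linarith [htot]
      exact ih (t + 1) _ (pvPassA_spec size q t hs d hd) (by omega) (by omega)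
    · rw [if_neg hlt]
      have : t = r := by
        have : ¬ t < r := fun h => hlt (by linarith)
        omega
      rwa [this] at hd

lemma pvMain : ∀ (rank size chunk num_rows : Int),
    Pre_chunk_indices_py rank size chunk num_rows →
    chunk_indices_py rank size chunk num_rows = chunk_indices_py_alt rank size chunk num_rows := by
  intro rank size chunk num_rows hpre
  obtain ⟨hc, hs, hr0, hrs⟩ := hpre
  simp only [chunk_indices_py, chunk_indices_py_alt]
  rw [if_neg (by simp only [not_not]; exact ⟨hr0, hrs⟩ : ¬ ¬ (0 ≤ rank ∧ rank < size))]
  set total := PySem.Int.floordiv num_rows chunk + 1 with htotal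
  set q := PySem.Int.floordiv total size with hq
  set r := total - size * q with hrdef
  have hmod : r = PySem.Int.mod total size := by
    have := PySem.Int.floordiv_mul_add_mod total size
    rw [hrdef, ← hq] at *
    linarith
  have hrnn : 0 ≤ r := by rw [hmod]; exact PySem.Int.mod_nonneg total hs
  have hrlt : r < size := by rw [hmod]; exact PySem.Int.mod_lt total hs
  have hfin : pvDspec size q r (pvLoopA size total (size.toNat + 1) (pvInitA size q)) := by
    apply pvLoopA_spec size q total r hs (by rw [hrdef]; ring) (size.toNat + 1) 0
      (pvInitA size q) (pvInitA_spec size q hs) hrnn (by omega)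
  rw [hfin rank, if_pos ⟨hr0, hrs⟩]
  simp only [pvEntry, List.getD, List.getElem?_cons_succ, List.getElem?_cons_zero,
    Option.getD_some]
  by_cases h1 : rank = size - 1
  · rw [if_pos h1]
    by_cases h2 : rank = 0
    · have hsz1 : size = 1 := by omega
      have hrz : r = 0 := by omega
      rw [if_pos h2, if_pos h1]
      subst h2; rw [hsz1, hrz]; norm_num
    · rw [if_neg h2, if_pos h1]
      subst h1
      simp only [List.cons.injEq, and_true]
      refine ⟨trivial, by ring⟩
  · rw [if_neg h1, if_neg h1]
    by_cases h2 : rank = 0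
    · rw [if_pos h2, if_pos h2]
      subst h2; norm_num
    · rw [if_neg h2, if_neg h2]
      simp only [List.cons.injEq, and_true]
      exact ⟨trivial, by ring⟩

-- ===== VERDICT (by name: the statement is the Claim_ definition above) =====
theorem chunk_indices_py_spec : Claim_equal_chunk_indices_py := by
  intro rank size chunk num_rows _hdom hpre
  unfold Spec_chunk_indices_py
  exact pvMain rank size chunk num_rows hpre
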